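-- pv_equiv track=rewrite | github.com/NikitaMeshDS/GraphPFound | Final_clear/build_em_seq.py | extract_row_state
-- ===== SOURCE A (Python) =====
-- def extract_row_state(chain, row):
--     """Возвращает (L_cb, R_cb) = (click,buy) для полки row"""
--     L_cb = (0, 0)
--     R_cb = (0, 0)
--     for (r, c), color, click, purchase, brk in chain:
--         if r == row:
--             if c == 0:
--                 L_cb = (click, purchase)
--             else:
--                 R_cb = (click, purchase)
--     return L_cb, R_cb
-- ===== SOURCE B (Python) =====
-- def extract_row_state(chain, row):
--     """Возвращает (L_cb, R_cb) = (click,buy) для полки row"""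
--     L_cb = (0, 0)
--     R_cb = (0, 0)
--     found_L = False
--     found_R = False
--     for (r, c), color, click, purchase, brk in reversed(chain):
--         if found_L and found_R:
--             break
--         if r == row:
--             if c == 0 and not found_L:
--                 L_cb = (click, purchase)
--                 found_L = True
--             elif c != 0 and not found_R:
--                 R_cb = (click, purchase)
--                 found_R = True
--     return L_cb, R_cb
-- ===== Notes on version B (the rewrite author's own statement) =====
-- stated objective: alternative
-- what changed: B scans the chain back-to-front keeping found_L/found_R flags and stops as soon as both slots are filled (first match from the end wins), instead of A's forward pass that overwrites each slot on every match.
import Mathlib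
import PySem

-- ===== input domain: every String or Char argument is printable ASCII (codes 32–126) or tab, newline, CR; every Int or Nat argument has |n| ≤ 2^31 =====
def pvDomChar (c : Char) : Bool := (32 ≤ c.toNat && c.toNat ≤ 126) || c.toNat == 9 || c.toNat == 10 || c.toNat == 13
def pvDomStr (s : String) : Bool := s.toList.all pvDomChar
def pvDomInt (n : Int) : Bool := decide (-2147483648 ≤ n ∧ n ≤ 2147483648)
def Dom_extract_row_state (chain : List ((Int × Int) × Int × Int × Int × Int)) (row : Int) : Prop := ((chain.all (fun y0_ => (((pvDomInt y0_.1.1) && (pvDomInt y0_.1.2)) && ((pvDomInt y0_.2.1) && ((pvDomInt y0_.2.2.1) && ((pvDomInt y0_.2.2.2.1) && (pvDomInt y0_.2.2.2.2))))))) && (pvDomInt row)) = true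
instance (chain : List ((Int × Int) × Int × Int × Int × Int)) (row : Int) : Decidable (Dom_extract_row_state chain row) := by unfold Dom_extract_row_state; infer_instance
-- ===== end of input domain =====

-- B scans the chain in reverse with found flags and early exit instead of A's forward overwrite pass; objective: alternative decomposition (same value proved equal).

-- ===== PORT A =====
-- forward pass: each matching element overwrites its slot, so the last match wins
def extract_row_state (chain : List ((Int × Int) × Int × Int × Int × Int)) (row : Int) : (Int × Int) × (Int × Int) :=
  chain.foldl (fun st e =>
    if e.1.1 = row then
      if e.1.2 = 0 then ((e.2.2.1, e.2.2.2.1), st.2)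
      else (st.1, (e.2.2.1, e.2.2.2.1))
    else st) ((0, 0), (0, 0))

-- ===== PORT B =====
-- loop over the reversed chain: first match from the end fills a slot once; break when both filled
def ersLoop (row : Int) : List ((Int × Int) × Int × Int × Int × Int) →
    (Int × Int) → (Int × Int) → Bool → Bool → (Int × Int) × (Int × Int)
  | [], L, R, _, _ => (L, R)
  | e :: t, L, R, fL, fR =>
    if fL ∧ fR then (L, R)
    else if e.1.1 = row then
      if e.1.2 = 0 ∧ ¬fL then ersLoop row t (e.2.2.1, e.2.2.2.1) R true fR
      else if e.1.2 ≠ 0 ∧ ¬fR then ersLoop row t L (e.2.2.1, e.2.2.2.1) fL true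
      else ersLoop row t L R fL fR
    else ersLoop row t L R fL fR

def extract_row_state_alt (chain : List ((Int × Int) × Int × Int × Int × Int)) (row : Int) : (Int × Int) × (Int × Int) :=
  ersLoop row chain.reverse (0, 0) (0, 0) false false

-- ===== PRECONDITION & SPEC =====
def Spec_extract_row_state (chain : List ((Int × Int) × Int × Int × Int × Int)) (row : Int) (out : (Int × Int) × (Int × Int)) : Prop := out = extract_row_state_alt chain row
instance (chain : List ((Int × Int) × Int × Int × Int × Int)) (row : Int) (out : (Int × Int) × (Int × Int)) : Decidable (Spec_extract_row_state chain row out) := by unfold Spec_extract_row_state; infer_instance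

-- ===== CLAIM (what is proved, stated in full; the proofs are below) =====
def Claim_equal_extract_row_state : Prop := ∀ (chain : List ((Int × Int) × Int × Int × Int × Int)) (row : Int), Dom_extract_row_state chain row → Spec_extract_row_state chain row (extract_row_state chain row)

-- ===== LEMMAS AND PROOFS =====

-- predicates for "matches the left slot" / "matches the right slot", and the extracted value
def isLmatch (row : Int) (e : (Int × Int) × Int × Int × Int × Int) : Bool := e.1.1 == row && e.1.2 == 0
def isRmatch (row : Int) (e : (Int × Int) × Int × Int × Int × Int) : Bool := e.1.1 == row && !(e.1.2 == 0)
def cpVal (e : (Int × Int) × Int × Int × Int × Int) : Int × Int := (e.2.2.1, e.2.2.2.1)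

-- A's fold computes, per slot, the value of the last matching element (first of the reversed list)
theorem foldA_char (row : Int) (l : List ((Int × Int) × Int × Int × Int × Int))
    (st : (Int × Int) × (Int × Int)) :
    l.foldl (fun st e =>
      if e.1.1 = row then
        if e.1.2 = 0 then ((e.2.2.1, e.2.2.2.1), st.2)
        else (st.1, (e.2.2.1, e.2.2.2.1))
      else st) st
    = (((l.reverse.find? (isLmatch row)).map cpVal).getD st.1,
       ((l.reverse.find? (isRmatch row)).map cpVal).getD st.2) := by
  induction l generalizing st with
  | nil => simp
  | cons e t ih =>
    simp only [List.foldl_cons, List.reverse_cons, List.find?_append]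
    rw [ih]
    rcases st with ⟨sL, sR⟩
    by_cases hr : e.1.1 = row
    · by_cases hc : e.1.2 = 0
      · simp [isLmatch, isRmatch, cpVal, hr, hc]
        cases t.reverse.find? (isLmatch row) <;> cases t.reverse.find? (isRmatch row) <;> simp [cpVal]
      · simp [isLmatch, isRmatch, cpVal, hr, hc]
        cases t.reverse.find? (isLmatch row) <;> cases t.reverse.find? (isRmatch row) <;> simp [cpVal]
    · simp [isLmatch, isRmatch, hr]

-- B's loop computes, per slot, the first matching element unless the slot is already found
theorem ersLoop_char (row : Int) (l : List ((Int × Int) × Int × Int × Int × Int))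
    (L R : Int × Int) (fL fR : Bool) :
    ersLoop row l L R fL fR
    = ((if fL then L else ((l.find? (isLmatch row)).map cpVal).getD L),
       (if fR then R else ((l.find? (isRmatch row)).map cpVal).getD R)) := by
  induction l generalizing L R fL fR with
  | nil => simp [ersLoop]
  | cons e t ih =>
    rw [ersLoop]
    by_cases hb : fL ∧ fR
    · simp [hb.1, hb.2]
    · rw [if_neg hb]
      by_cases hr : e.1.1 = row
      · rw [if_pos hr]
        by_cases hc : e.1.2 = 0
        · by_cases hfL : fL
          · have : ¬(e.1.2 = 0 ∧ ¬fL) := by simp [hfL]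
            rw [if_neg this, if_neg (by simp [hc]), ih]
            simp [isRmatch, hr, hc, hfL]
          · rw [if_pos ⟨hc, by simp [hfL]⟩, ih]
            simp [isLmatch, isRmatch, cpVal, hr, hc, hfL]
        · by_cases hfR : fR
          · rw [if_neg (by simp [hc]), if_neg (by simp [hfR]), ih]
            simp [isLmatch, hr, hc, hfR]
          · rw [if_neg (by simp [hc]), if_pos ⟨hc, by simp [hfR]⟩, ih]
            simp [isLmatch, isRmatch, cpVal, hr, hc, hfR]
      · rw [if_neg hr, ih]
        simp [isLmatch, isRmatch, hr]

-- ===== VERDICT (by name: the statement is the Claim_ definition above) =====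
theorem extract_row_state_spec : Claim_equal_extract_row_state := by
  intro chain row _
  unfold Spec_extract_row_state extract_row_state extract_row_state_alt
  rw [foldA_char, ersLoop_char]
  simp
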